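-- pv_equiv track=rewrite | github.com/banned104/wind-engine-windows | EGL_Component/Component_Shader_Blinn_Phong/Convert_GLSL_to_h.py | clean_whitespace
-- ===== SOURCE A (Python) =====
-- def clean_whitespace(content):
--     """清理多余的空白字符和空行"""
--     # 分割成行
--     lines = content.split('\n')
--     # 移除每行末尾的空白字符，但保留有内容的行
--     cleaned_lines = []
--     for line in lines:
--         stripped = line.rstrip()
--         # 保留非空行和只包含空白字符的行（转换为空行）
--         if stripped or (not stripped and line.strip() == ''):
--             cleaned_lines.append(stripped)
--
--     # 移除连续的空行，只保留单个空行
--     result_lines = []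
--     prev_empty = False
--     for line in cleaned_lines:
--         if line.strip() == '':
--             if not prev_empty:
--                 result_lines.append('')
--             prev_empty = True
--         else:
--             result_lines.append(line)
--             prev_empty = False
--
--     # 移除开头和结尾的空行
--     while result_lines and result_lines[0] == '':
--         result_lines.pop(0)
--     while result_lines and result_lines[-1] == '':
--         result_lines.pop()
--
--     return '\n'.join(result_lines)
-- ===== SOURCE B (Python) =====
-- def clean_whitespace(content):
--     """清理多余的空白字符和空行"""
--     lines = [line.rstrip() for line in content.split('\n')]
--     # keep a line if it is non-blank, or it is the first blank after a non-blank line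
--     kept = [line for line, prev in zip(lines, [''] + lines) if line or prev]
--     # at most one blank can remain at the end; drop it
--     if kept and kept[-1] == '':
--         kept = kept[:-1]
--     return '\n'.join(kept)
-- ===== Notes on version B (the rewrite author's own statement) =====
-- stated objective: simpler
-- what changed: Replaces A's stateful prev_empty collapse pass plus two pop-while trimming loops with a single predecessor-pairing comprehension (zip each rstripped line with the line before it, keep a blank only right after a non-blank) and one conditional drop of a final blank.
import Mathlib
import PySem

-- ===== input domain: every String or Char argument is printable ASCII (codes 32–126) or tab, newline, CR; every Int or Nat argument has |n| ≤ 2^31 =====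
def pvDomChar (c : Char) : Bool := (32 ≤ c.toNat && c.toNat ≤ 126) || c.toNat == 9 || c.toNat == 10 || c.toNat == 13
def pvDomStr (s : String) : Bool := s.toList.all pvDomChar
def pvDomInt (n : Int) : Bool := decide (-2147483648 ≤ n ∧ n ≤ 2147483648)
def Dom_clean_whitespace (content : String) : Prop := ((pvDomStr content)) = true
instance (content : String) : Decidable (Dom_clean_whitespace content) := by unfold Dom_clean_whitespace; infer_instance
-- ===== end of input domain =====

-- B replaces A's stateful prev_empty collapse pass and its two pop-while trimming
-- loops by one predecessor-pairing filter and a single conditional drop at the end (objective: simpler).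

-- ===== PORT A =====
-- while result_lines and result_lines[0] == '': result_lines.pop(0)
def popLeadingA : List String → List String
  | [] => []
  | x :: xs => if x = "" then popLeadingA xs else x :: xs

-- while result_lines and result_lines[-1] == '': result_lines.pop()
def popTrailingA : List String → List String
  | [] => []
  | x :: xs => let r := popTrailingA xs; if r = [] ∧ x = "" then [] else x :: r

def clean_whitespace (content : String) : String :=
  let lines := (PySem.Str.split? content "\n").getD []
  let cleaned_lines := lines.foldl (fun acc line =>
    let stripped := PySem.Str.rstrip line
    if stripped ≠ "" ∨ (¬ stripped ≠ "" ∧ PySem.Str.strip line = "") then acc ++ [stripped]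
    else acc) []
  let result_lines := (cleaned_lines.foldl (fun (st : List String × Bool) line =>
    if PySem.Str.strip line = "" then
      (if ¬ st.2 then st.1 ++ [""] else st.1, true)
    else (st.1 ++ [line], false)) ([], false)).1
  PySem.Str.join "\n" (popTrailingA (popLeadingA result_lines))

-- ===== PORT B =====
def clean_whitespace_alt (content : String) : String :=
  let lines := ((PySem.Str.split? content "\n").getD []).map PySem.Str.rstrip
  let kept := ((lines.zip ("" :: lines)).filter (fun lp => lp.1 != "" || lp.2 != "")).map (·.1)
  let kept := if kept.getLast? = some "" then kept.dropLast else kept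
  PySem.Str.join "\n" kept

-- ===== PRECONDITION & SPEC =====
def Spec_clean_whitespace (content : String) (out : String) : Prop := out = clean_whitespace_alt content
instance (content : String) (out : String) : Decidable (Spec_clean_whitespace content out) := by unfold Spec_clean_whitespace; infer_instance

-- ===== CLAIM (what is proved, stated in full; the proofs are below) =====
def Claim_equal_clean_whitespace : Prop := ∀ (content : String), Dom_clean_whitespace content → Spec_clean_whitespace content (clean_whitespace content)

-- ===== LEMMAS AND PROOFS =====

-- the collapse loop's result, without the accumulator (prev_empty as an argument)
def pvCollapse : Bool → List String → List String
  | _, [] => []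
  | pe, x :: xs =>
    if x = "" then (if pe then pvCollapse true xs else "" :: pvCollapse true xs)
    else x :: pvCollapse false xs

lemma chars_rstrip_eq_nil_iff (s : List Char) :
    PySem.Chars.rstrip s = [] ↔ ∀ c ∈ s, PySem.Chars.isspace c = true := by
  simp [PySem.Chars.rstrip, List.dropWhile_eq_nil_iff]

lemma chars_strip_eq_nil_iff (s : List Char) :
    PySem.Chars.strip s = [] ↔ ∀ c ∈ s, PySem.Chars.isspace c = true := by
  rw [PySem.Chars.strip, PySem.Chars.lstrip, chars_rstrip_eq_nil_iff]
  constructor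
  · intro h c hc
    rcases List.mem_append.mp
      ((List.takeWhile_append_dropWhile (p := PySem.Chars.isspace) (l := s)) ▸ hc) with h1 | h2
    · exact List.mem_takeWhile_imp h1
    · exact h c h2
  · intro h c hc
    exact h c ((List.dropWhile_sublist _).mem hc)

lemma chars_all_ws_rstrip (s : List Char)
    (h : ∀ c ∈ PySem.Chars.rstrip s, PySem.Chars.isspace c = true) :
    PySem.Chars.rstrip s = [] := by
  have hd : List.dropWhile PySem.Chars.isspace s.reverse = [] := by
    by_contra hne
    have hh := List.head_dropWhile_not PySem.Chars.isspace hne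
    have hmem : (List.dropWhile PySem.Chars.isspace s.reverse).head hne ∈ PySem.Chars.rstrip s := by
      rw [PySem.Chars.rstrip]
      exact List.mem_reverse.mpr (List.head_mem hne)
    simp [h _ hmem] at hh
  simp [PySem.Chars.rstrip, hd]

lemma str_eq_empty_iff (s : String) : s = "" ↔ s.toList = [] := by
  rw [← String.toList_inj]
  simp

lemma strip_eq_empty_iff_rstrip (s : String) :
    PySem.Str.strip s = "" ↔ PySem.Str.rstrip s = "" := by
  rw [str_eq_empty_iff, str_eq_empty_iff, PySem.Str.toList_strip, PySem.Str.toList_rstrip,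
    chars_strip_eq_nil_iff, chars_rstrip_eq_nil_iff]

-- the rstripped lines satisfy: strip m = "" ↔ m = ""
lemma strip_rstrip_eq_empty_iff (s : String) :
    PySem.Str.strip (PySem.Str.rstrip s) = "" ↔ PySem.Str.rstrip s = "" := by
  rw [str_eq_empty_iff (PySem.Str.strip _), str_eq_empty_iff, PySem.Str.toList_strip,
    PySem.Str.toList_rstrip, chars_strip_eq_nil_iff]
  constructor
  · intro h
    exact chars_all_ws_rstrip _ (by simpa [PySem.Str.toList_rstrip] using h)
  · intro h
    rw [h]; simp

-- A's first loop is the map with rstrip (its condition is always true)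
lemma foldA1 (ls : List String) (acc : List String) :
    ls.foldl (fun acc line =>
      let stripped := PySem.Str.rstrip line
      if stripped ≠ "" ∨ (¬ stripped ≠ "" ∧ PySem.Str.strip line = "") then acc ++ [stripped]
      else acc) acc = acc ++ ls.map PySem.Str.rstrip := by
  induction ls generalizing acc with
  | nil => simp
  | cons x xs ih =>
    have hcond : PySem.Str.rstrip x ≠ "" ∨
        (¬ PySem.Str.rstrip x ≠ "" ∧ PySem.Str.strip x = "") := by
      by_cases h : PySem.Str.rstrip x = ""
      · exact Or.inr ⟨by simpa using h, (strip_eq_empty_iff_rstrip x).mpr h⟩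
      · exact Or.inl h
    simp only [List.foldl_cons, List.map_cons]
    rw [if_pos hcond, ih]
    simp

-- A's second loop computes pvCollapse, on lists of rstripped strings
lemma foldA2 (ls : List String) (acc : List String) (pe : Bool)
    (h : ∀ m ∈ ls, (PySem.Str.strip m = "" ↔ m = "")) :
    (ls.foldl (fun (st : List String × Bool) line =>
      if PySem.Str.strip line = "" then
        (if ¬ st.2 then st.1 ++ [""] else st.1, true)
      else (st.1 ++ [line], false)) (acc, pe)).1 = acc ++ pvCollapse pe ls := by
  induction ls generalizing acc pe with
  | nil => simp [pvCollapse]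
  | cons m ms ih =>
    have hm := h m (by simp)
    have hms : ∀ m' ∈ ms, (PySem.Str.strip m' = "" ↔ m' = "") := fun m' hm' => h m' (by simp [hm'])
    by_cases he : m = ""
    · have hs : PySem.Str.strip m = "" := hm.mpr he
      cases pe with
      | true =>
        simp only [List.foldl_cons, if_pos hs, pvCollapse, if_pos he]
        simpa using ih acc true hms
      | false =>
        simp only [List.foldl_cons, if_pos hs, pvCollapse, if_pos he]
        rw [show (if ¬false = true then acc ++ [""] else acc) = acc ++ [""] from by simp,
          ih (acc ++ [""]) true hms]
        simp
    · have hs : ¬ PySem.Str.strip m = "" := fun hc => he (hm.mp hc)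
      simp only [List.foldl_cons, if_neg hs, pvCollapse, if_neg he]
      rw [ih (acc ++ [m]) false hms]
      simp

-- B's zip-filter computes pvCollapse as well
lemma keep_eq_collapse (ls : List String) (p : String) :
    ((ls.zip (p :: ls)).filter (fun lp => lp.1 != "" || lp.2 != "")).map (·.1)
      = pvCollapse (p == "") ls := by
  induction ls generalizing p with
  | nil => simp [pvCollapse]
  | cons x xs ih =>
    rw [List.zip_cons_cons, List.filter_cons]
    by_cases hx : x = ""
    · by_cases hp : p = ""
      · simp only [hx, hp]
        rw [if_neg (by simp), ih ""]
        simp [pvCollapse]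
      · have hc : ((fun (lp : String × String) => lp.1 != "" || lp.2 != "") (x, p)) = true := by
          simp [hx, hp]
        have hb : (p == "") = false := beq_eq_false_iff_ne.mpr hp
        rw [if_pos hc, List.map_cons, ih x]
        simp [pvCollapse, hx, hb]
    · have hc : ((fun (lp : String × String) => lp.1 != "" || lp.2 != "") (x, p)) = true := by
        simp [hx]
      have hb : (x == "") = false := beq_eq_false_iff_ne.mpr hx
      rw [if_pos hc, List.map_cons, ih x]
      simp [pvCollapse, hx, hb]

lemma head_collapse_true (ls : List String) :
    ∀ h ∈ (pvCollapse true ls).head?, h ≠ "" := by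
  induction ls with
  | nil => simp [pvCollapse]
  | cons x xs ih =>
    by_cases hx : x = ""
    · simpa [pvCollapse, hx] using ih
    · simp [pvCollapse, hx]

lemma chain_collapse (pe : Bool) (ls : List String) :
    List.IsChain (fun a b => ¬ (a = "" ∧ b = "")) (pvCollapse pe ls) := by
  induction ls generalizing pe with
  | nil => simp [pvCollapse]
  | cons x xs ih =>
    by_cases hx : x = ""
    · cases pe with
      | true => simpa [pvCollapse, hx] using ih true
      | false =>
        have h1 : pvCollapse false (x :: xs) = "" :: pvCollapse true xs := by
          simp [pvCollapse, hx]
        rw [h1, List.isChain_cons]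
        exact ⟨fun y hy hc => head_collapse_true xs y hy hc.2, ih true⟩
    · simp only [pvCollapse, hx, ite_false]
      rw [List.isChain_cons]
      exact ⟨fun y hy hc => hx hc.1, ih false⟩

lemma popLeading_fix (l : List String) (h : ∀ y ∈ l.head?, y ≠ "") :
    popLeadingA l = l := by
  cases l with
  | nil => rfl
  | cons x xs =>
    have : x ≠ "" := h x (by simp)
    simp [popLeadingA, this]

lemma popLeading_collapse (ls : List String) :
    popLeadingA (pvCollapse false ls) = pvCollapse true ls := by
  cases ls with
  | nil => rfl
  | cons x xs =>
    by_cases hx : x = ""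
    · have h1 : pvCollapse false (x :: xs) = "" :: pvCollapse true xs := by
        simp [pvCollapse, hx]
      have h2 : pvCollapse true (x :: xs) = pvCollapse true xs := by
        simp [pvCollapse, hx]
      rw [h1, h2]
      simp only [popLeadingA, reduceIte]
      exact popLeading_fix _ (head_collapse_true xs)
    · simp [pvCollapse, hx, popLeadingA]

lemma popTrailing_of_chain (l : List String)
    (h : List.IsChain (fun a b => ¬ (a = "" ∧ b = "")) l) :
    popTrailingA l = if l.getLast? = some "" then l.dropLast else l := by
  induction l with
  | nil => simp [popTrailingA]
  | cons x xs ih =>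
    cases xs with
    | nil =>
      by_cases hx : x = "" <;> simp [popTrailingA, hx]
    | cons y ys =>
      have hxs := ih (h.tail)
      have hR : ¬ (x = "" ∧ y = "") := (List.isChain_cons.mp h).1 y (by simp)
      rw [popTrailingA]
      simp only [hxs, List.getLast?_cons_cons]
      by_cases hl : (y :: ys).getLast? = some ""
      · rw [if_pos hl, if_pos hl]
        by_cases hd : (y :: ys).dropLast = []
        · have hys : ys = [] := by
            cases ys with
            | nil => rfl
            | cons z zs => simp [List.dropLast] at hd
          subst hys
          have hy : y = "" := by simpa using hl
          have hx : x ≠ "" := fun hx => hR ⟨hx, hy⟩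
          simp [hx, List.dropLast]
        · rw [if_neg (by simp [hd])]
          cases ys with
          | nil => simp [List.dropLast] at hd
          | cons z zs => simp [List.dropLast]
      · rw [if_neg hl, if_neg hl, if_neg (by simp)]

-- ===== VERDICT (by name: the statement is the Claim_ definition above) =====
theorem clean_whitespace_spec : Claim_equal_clean_whitespace := by
  intro content _
  unfold Spec_clean_whitespace clean_whitespace clean_whitespace_alt
  simp only []
  set ls := (PySem.Str.split? content "\n").getD [] with hls
  have hQ : ∀ m ∈ ls.map PySem.Str.rstrip, (PySem.Str.strip m = "" ↔ m = "") := by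
    intro m hm
    rcases List.mem_map.mp hm with ⟨s, _, rfl⟩
    constructor
    · intro h; exact (strip_rstrip_eq_empty_iff s).mp h
    · intro h; rw [h]; rfl
  rw [foldA1, List.nil_append, foldA2 _ [] false hQ, List.nil_append,
    popLeading_collapse, popTrailing_of_chain _ (chain_collapse true _),
    keep_eq_collapse]
  rfl
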